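-- pv_equiv track=rewrite | github.com/trieli8/bolderdash_planning | tools/benchmarking/bench_plus.py | split_items
-- ===== SOURCE A (Python) =====
-- from typing import List, Optional, Sequence, Tuple
--
-- def split_items(values: Optional[Sequence[str]]) -> List[str]:
--     if not values:
--         return []
--     out: List[str] = []
--     for raw in values:
--         for part in raw.split(","):
--             token = part.strip()
--             if token:
--                 out.append(token)
--     return out
-- ===== SOURCE B (Python) =====
-- def split_items(values):
--     if not values:
--         return []
--     out = []
--     for raw in values:
--         cur = []      # chars of the token being built (never starts/ends with whitespace)
--         pending = []  # whitespace seen after the token started; emitted only if more non-space follows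
--         for c in raw:
--             if c == ",":
--                 if cur:
--                     out.append("".join(cur))
--                 cur = []
--                 pending = []
--             elif c.isspace():
--                 if cur:
--                     pending.append(c)
--             else:
--                 cur.extend(pending)
--                 pending = []
--                 cur.append(c)
--         if cur:
--             out.append("".join(cur))
--     return out
-- ===== Notes on version B (the rewrite author's own statement) =====
-- stated objective: alternative
-- what changed: Replaces A's split(",")/strip library pipeline with a hand-written single-pass character state machine that builds each token with a current-chars buffer and a pending-whitespace buffer, never materialising the split parts.
import Mathlib
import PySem

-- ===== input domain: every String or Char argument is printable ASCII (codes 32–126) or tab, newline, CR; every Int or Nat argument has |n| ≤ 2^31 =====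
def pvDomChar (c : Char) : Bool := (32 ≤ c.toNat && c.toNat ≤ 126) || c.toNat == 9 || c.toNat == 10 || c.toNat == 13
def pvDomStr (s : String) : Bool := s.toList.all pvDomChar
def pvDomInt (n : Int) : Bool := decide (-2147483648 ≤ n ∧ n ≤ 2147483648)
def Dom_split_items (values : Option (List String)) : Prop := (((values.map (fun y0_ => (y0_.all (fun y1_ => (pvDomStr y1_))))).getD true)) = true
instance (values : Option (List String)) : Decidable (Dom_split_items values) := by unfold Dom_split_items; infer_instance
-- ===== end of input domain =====

-- B replaces A's split/strip library calls with a hand-written single-pass character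
-- state machine (current-token + pending-whitespace buffers); alternative decomposition, same cost.

-- ===== PORT A =====
def split_items (values : Option (List String)) : List String :=
  match values with
  | none => []
  | some vs =>
    if vs = [] then []
    else
      vs.foldl (fun out raw =>
        ((PySem.Str.split? raw ",").getD []).foldl (fun out part =>
          let token := PySem.Str.strip part
          if token ≠ "" then out ++ [token] else out) out) []

-- ===== PORT B =====
-- the inner character loop of Source B: state (cur, pending, out)
def scanChars : List Char → List Char → List Char → List String → List String
  | [], cur, _pending, out =>
      if cur ≠ [] then out ++ [String.ofList cur] else out
  | c :: rest, cur, pending, out =>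
      if c = ',' then
        scanChars rest [] [] (if cur ≠ [] then out ++ [String.ofList cur] else out)
      else if PySem.Chars.isspace c then
        scanChars rest cur (if cur ≠ [] then pending ++ [c] else pending) out
      else
        scanChars rest (cur ++ pending ++ [c]) [] out

def split_items_alt (values : Option (List String)) : List String :=
  match values with
  | none => []
  | some vs =>
    if vs = [] then []
    else vs.foldl (fun out raw => scanChars raw.toList [] [] out) []

-- ===== PRECONDITION & SPEC =====
def Spec_split_items (values : Option (List String)) (out : List String) : Prop := out = split_items_alt values
instance (values : Option (List String)) (out : List String) : Decidable (Spec_split_items values out) := by unfold Spec_split_items; infer_instance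

-- ===== CLAIM (what is proved, stated in full; the proofs are below) =====
def Claim_equal_split_items : Prop := ∀ (values : Option (List String)), Dom_split_items values → Spec_split_items values (split_items values)

-- ===== LEMMAS AND PROOFS =====

-- A direct structural recursion computing Python's s.split(",") (single-character separator).
def mySplit : List Char → List (List Char)
  | [] => [[]]
  | c :: rest =>
    if c = ',' then [] :: mySplit rest
    else
      match mySplit rest with
      | [] => [[c]]
      | h :: t => (c :: h) :: t

theorem mySplit_ne_nil (l : List Char) : mySplit l ≠ [] := by
  cases l with
  | nil => simp [mySplit]
  | cons c rest =>
    simp only [mySplit]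
    split_ifs
    · simp
    · cases h : mySplit rest <;> simp

theorem go_comma (l : List Char) : ∀ (fuel : Nat) (cur : List Char) (acc : List (List Char)),
    l.length ≤ fuel →
    PySem.Chars.splitOn.go [','] fuel l cur acc
      = acc.reverse ++ (mySplit l).modifyHead (fun h => cur.reverse ++ h) := by
  induction l with
  | nil =>
    intro fuel cur acc _
    cases fuel <;> simp [PySem.Chars.splitOn.go, mySplit]
  | cons c rest ih =>
    intro fuel cur acc hfuel
    cases fuel with
    | zero => simp at hfuel
    | succ f =>
      rw [PySem.Chars.splitOn.go.eq_def]
      have hf' : rest.length ≤ f := by simpa using Nat.succ_le_succ_iff.mp hfuel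
      by_cases hc : c = ','
      · subst hc
        have h1 := ih f [] (cur.reverse :: acc) hf'
        simp [List.isPrefixOf, h1, mySplit]
        cases mySplit rest <;> simp
      · have hb : (',' == c) = false := beq_eq_false_iff_ne.mpr (Ne.symm hc)
        have h1 := ih f (c :: cur) acc hf'
        simp only [List.isPrefixOf, hb, Bool.false_and, Bool.false_eq_true, if_neg,
          not_false_eq_true, h1, mySplit, if_neg hc]
        cases h : mySplit rest with
        | nil => exact absurd h (mySplit_ne_nil rest)
        | cons hd tl => simp

theorem splitOn_comma (l : List Char) : PySem.Chars.splitOn l [','] = mySplit l := by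
  rw [PySem.Chars.splitOn.eq_def, go_comma l (l.length + 1) [] [] (by omega)]
  cases h : mySplit l with
  | nil => exact absurd h (mySplit_ne_nil l)
  | cons hd tl => simp

-- A's inner loop over the parts of one string appends the stripped non-empty tokens.
theorem inner_foldl (parts : List String) (out : List String) :
    parts.foldl (fun out part =>
        let token := PySem.Str.strip part
        if token ≠ "" then out ++ [token] else out) out
      = out ++ (parts.map PySem.Str.strip).filter (fun t => t ≠ "") := by
  induction parts generalizing out with
  | nil => simp
  | cons p t ih =>
    simp only [List.foldl_cons, List.map_cons, List.filter_cons]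
    rw [ih]
    by_cases h : PySem.Str.strip p = "" <;> simp [h]

-- the tokens one raw string contributes
def tokensOf (raw : String) : List String :=
  ((PySem.Chars.splitOn raw.toList [',']).map (fun p => String.ofList (PySem.Chars.strip p))).filter
    (fun t => t ≠ "")

theorem strip_ofList (p : List Char) :
    PySem.Str.strip (String.ofList p) = String.ofList (PySem.Chars.strip p) := by
  simp [PySem.Str.strip]

theorem tokensOf_eq (raw : String) :
    tokensOf raw = List.filter (fun t => !decide (t = ""))
      (List.map (fun p => String.ofList (PySem.Chars.strip p)) (PySem.Chars.splitOn raw.toList [','])) := by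
  simp [tokensOf]

theorem A_eq (vs : List String) :
    vs.foldl (fun out raw =>
        ((PySem.Str.split? raw ",").getD []).foldl (fun out part =>
          let token := PySem.Str.strip part
          if token ≠ "" then out ++ [token] else out) out) []
      = vs.flatMap tokensOf := by
  have h : ∀ (out : List String), vs.foldl (fun out raw =>
        ((PySem.Str.split? raw ",").getD []).foldl (fun out part =>
          let token := PySem.Str.strip part
          if token ≠ "" then out ++ [token] else out) out) out
      = out ++ vs.flatMap tokensOf := by
    intro out
    induction vs generalizing out with
    | nil => simp
    | cons v t ih =>
      simp only [List.foldl_cons, List.flatMap_cons]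
      rw [ih, inner_foldl]
      rw [← List.append_assoc]
      congr 1
      simp only [PySem.Str.split?, PySem.Chars.split?]
      simp [List.map_map, Function.comp_def, strip_ofList, tokensOf_eq]
  simpa using h []

-- ---- B-side lemmas: the state machine computes strip-of-split tokens ----

theorem rstrip_snoc (l : List Char) (c : Char) (hc : PySem.Chars.isspace c = false) :
    PySem.Chars.rstrip (l ++ [c]) = l ++ [c] := by
  unfold PySem.Chars.rstrip
  rw [List.reverse_append]
  simp [hc]

theorem rstrip_append_spaces (cur pending : List Char)
    (hp : ∀ c ∈ pending, PySem.Chars.isspace c = true)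
    (h2 : PySem.Chars.rstrip cur = cur) :
    PySem.Chars.rstrip (cur ++ pending) = cur := by
  unfold PySem.Chars.rstrip at *
  rw [List.reverse_append, List.dropWhile_append]
  have hdropP : List.dropWhile PySem.Chars.isspace pending.reverse = [] := by
    apply List.dropWhile_eq_nil_iff.mpr
    intro x hx; exact hp x (by simpa using hx)
  rw [hdropP]
  simpa using h2

theorem strip_cons_space (c : Char) (h : List Char) (hc : PySem.Chars.isspace c = true) :
    PySem.Chars.strip (c :: h) = PySem.Chars.strip h := by
  simp [PySem.Chars.strip, PySem.Chars.lstrip, hc]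

-- a stripped prefix followed by pending whitespace strips back to the prefix
theorem strip_cur_pending (cur pending : List Char)
    (hp : ∀ c ∈ pending, PySem.Chars.isspace c = true)
    (h1 : ∀ c, cur.head? = some c → PySem.Chars.isspace c = false)
    (h2 : PySem.Chars.rstrip cur = cur)
    (hlink : cur = [] → pending = []) :
    PySem.Chars.strip (cur ++ pending) = cur := by
  cases cur with
  | nil => simp [hlink rfl, PySem.Chars.strip, PySem.Chars.lstrip, PySem.Chars.rstrip]
  | cons a cur' =>
    have ha : PySem.Chars.isspace a = false := h1 a rfl
    have hl : PySem.Chars.lstrip ((a :: cur') ++ pending) = (a :: cur') ++ pending := by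
      simp [PySem.Chars.lstrip, ha]
    unfold PySem.Chars.strip
    rw [hl, rstrip_append_spaces _ _ hp h2]

theorem scan_eq (l : List Char) : ∀ (cur pending : List Char) (out : List String)
    (h : List Char) (t : List (List Char)), mySplit l = h :: t →
    (∀ c ∈ pending, PySem.Chars.isspace c = true) →
    (∀ c, cur.head? = some c → PySem.Chars.isspace c = false) →
    PySem.Chars.rstrip cur = cur →
    (cur = [] → pending = []) →
    scanChars l cur pending out =
      out ++ ((PySem.Chars.strip (cur ++ pending ++ h) :: t.map PySem.Chars.strip).filter
        (fun p => p ≠ [])).map String.ofList := by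
  induction l with
  | nil =>
    intro cur pending out h t hs hp h1 h2 hlink
    simp only [mySplit] at hs
    injection hs with e1 e2
    subst e1; subst e2
    rw [List.append_nil, scanChars,
      strip_cur_pending cur pending hp h1 h2 hlink]
    by_cases hc : cur = [] <;> simp [hc]
  | cons c rest ih =>
    intro cur pending out h t hs hp h1 h2 hlink
    obtain ⟨h', t', hs'⟩ : ∃ h' t', mySplit rest = h' :: t' := by
      cases hmy : mySplit rest with
      | nil => exact absurd hmy (mySplit_ne_nil rest)
      | cons a b => exact ⟨a, b, rfl⟩
    by_cases hc : c = ','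
    · subst hc
      have hm : mySplit (',' :: rest) = [] :: mySplit rest := by simp [mySplit]
      rw [hm] at hs
      injection hs with e1 e2
      subst e1
      rw [scanChars, if_pos rfl,
        ih [] [] _ h' t' hs' (by simp) (by simp) (by simp [PySem.Chars.rstrip]) (fun _ => rfl)]
      simp only [List.append_nil, List.nil_append]
      rw [strip_cur_pending cur pending hp h1 h2 hlink, ← e2, hs']
      by_cases hcur : cur = []
      · simp [hcur]
      · simp [hcur, List.filter_cons]
    · have hm : mySplit (c :: rest) = (c :: h') :: t' := by
        simp only [mySplit, if_neg hc, hs']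
      rw [hm] at hs
      injection hs with e1 e2
      subst e1; subst e2
      rw [scanChars, if_neg hc]
      by_cases hsp : PySem.Chars.isspace c = true
      · simp only [hsp, if_true]
        by_cases hcur : cur = []
        · subst hcur
          rw [hlink rfl]
          simp only [ne_eq, not_true_eq_false, if_false]
          rw [ih [] [] out h' t' hs' (by simp) (by simp) (by simp [PySem.Chars.rstrip]) (fun _ => rfl)]
          simp [strip_cons_space c h' hsp]
        · simp only [if_pos hcur]
          rw [ih cur (pending ++ [c]) out h' t' hs'
            (by intro x hx
                rcases List.mem_append.mp hx with hx | hx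
                · exact hp x hx
                · simp at hx; subst hx; exact hsp)
            h1 h2 (fun hce => absurd hce hcur)]
          congr 3
          simp
      · have hspf : PySem.Chars.isspace c = false := Bool.eq_false_iff.mpr hsp
        simp only [hsp]
        rw [ih (cur ++ pending ++ [c]) [] out h' t' hs' (by simp)
          (by intro x hx
              cases cur with
              | nil =>
                rw [hlink rfl] at hx
                simp at hx
                subst hx
                exact hspf
              | cons a b =>
                simp at hx
                subst hx
                exact h1 a rfl)
          (rstrip_snoc (cur ++ pending) c hspf)
          (by simp)]
        simp

theorem map_filter_ofList (xs : List (List Char)) :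
    (xs.filter (fun p => p ≠ [])).map String.ofList
      = (xs.map String.ofList).filter (fun t => t ≠ "") := by
  induction xs with
  | nil => rfl
  | cons x t ih =>
    simp only [ne_eq, decide_not] at ih
    by_cases hx : x = [] <;>
      simp [hx, ih, show String.ofList ([] : List Char) = "" from rfl]

theorem scan_tokens (raw : String) (out : List String) :
    scanChars raw.toList [] [] out = out ++ tokensOf raw := by
  obtain ⟨h, t, hs⟩ : ∃ h t, mySplit raw.toList = h :: t := by
    cases hmy : mySplit raw.toList with
    | nil => exact absurd hmy (mySplit_ne_nil _)
    | cons a b => exact ⟨a, b, rfl⟩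
  rw [scan_eq raw.toList [] [] out h t hs (by simp) (by simp) (by simp [PySem.Chars.rstrip]) (fun _ => rfl)]
  congr 1
  rw [tokensOf_eq, splitOn_comma, hs]
  simp only [List.nil_append]
  rw [map_filter_ofList]
  simp [List.map_map, Function.comp_def]

theorem B_eq (vs : List String) :
    vs.foldl (fun out raw => scanChars raw.toList [] [] out) [] = vs.flatMap tokensOf := by
  have h : ∀ out, vs.foldl (fun out raw => scanChars raw.toList [] [] out) out
      = out ++ vs.flatMap tokensOf := by
    intro out
    induction vs generalizing out with
    | nil => simp
    | cons v t ih =>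
      simp only [List.foldl_cons, List.flatMap_cons]
      rw [scan_tokens, ih, List.append_assoc]
  simpa using h []

-- ===== VERDICT (by name: the statement is the Claim_ definition above) =====
theorem split_items_spec : Claim_equal_split_items := by
  intro values _
  unfold Spec_split_items split_items split_items_alt
  cases values with
  | none => rfl
  | some vs =>
    by_cases h : vs = []
    · simp [h]
    · simp only [if_neg h]
      rw [A_eq, B_eq]
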